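-- pv_equiv track=rewrite | github.com/HaryNug/python | Hackerrank/Compare_The_Triplet.py | compareTripletsfor
-- ===== SOURCE A (Python) =====
-- def compareTripletsfor(c,d):
--     hasil=[0,0]
--     i=0
--     for k in c:
--         if k>d[i]:
--             hasil[0] +=1
--         elif k<d[i]:
--             hasil[1] +=1
--         i+=1
--     return hasil
-- ===== SOURCE B (Python) =====
-- def compareTripletsfor(c, d):
--     # sign-sum reformulation: keep the net score s = wins - losses and the
--     # number of decided rounds nz = wins + losses, then recover the counts.
--     s = 0
--     nz = 0
--     for x, y in zip(c, d):
--         if x != y: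
--             nz += 1
--             s += 1 if x > y else -1
--     return [(nz + s) // 2, (nz - s) // 2]
-- ===== Notes on version B (the rewrite author's own statement) =====
-- stated objective: alternative
-- what changed: Instead of maintaining the two counters directly, B accumulates the net score s = wins - losses and the number of decided comparisons nz = wins + losses over zip(c,d) and recovers the counts arithmetically as [(nz+s)//2, (nz-s)//2]; Pre_ excludes len(d) < len(c), where A raises IndexError (B's zip would silently drop the tail there).
import Mathlib
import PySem

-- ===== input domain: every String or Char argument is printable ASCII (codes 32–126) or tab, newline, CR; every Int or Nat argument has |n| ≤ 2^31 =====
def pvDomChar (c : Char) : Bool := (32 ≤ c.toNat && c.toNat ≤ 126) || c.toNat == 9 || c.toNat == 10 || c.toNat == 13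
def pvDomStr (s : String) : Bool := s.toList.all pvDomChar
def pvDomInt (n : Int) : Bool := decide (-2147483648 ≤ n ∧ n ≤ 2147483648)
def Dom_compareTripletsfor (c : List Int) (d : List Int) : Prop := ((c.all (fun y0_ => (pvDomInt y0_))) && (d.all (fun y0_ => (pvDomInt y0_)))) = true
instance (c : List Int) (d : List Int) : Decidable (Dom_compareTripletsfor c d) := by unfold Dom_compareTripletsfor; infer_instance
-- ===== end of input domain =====

-- B replaces A's two direct counters by a sign-sum over zip(c,d): it accumulates the net
-- score s = wins - losses and the decided count nz = wins + losses, then recovers the two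
-- counts arithmetically (alternative formulation, same cost).

-- ===== PORT A =====
-- fused loop: state = (hasil, i); d[i] is exact under Pre_ (index in range)
def compareTripletsfor (c : List Int) (d : List Int) : List Int :=
  let st := c.foldl (fun (st : (Int × Int) × Int) k =>
      let di := PySem.List.pyGetD d st.2 0
      let hasil := if k > di then (st.1.1 + 1, st.1.2)
                   else if k < di then (st.1.1, st.1.2 + 1)
                   else st.1
      (hasil, st.2 + 1)) ((0, 0), 0)
  [st.1.1, st.1.2]

-- ===== PORT B =====
-- state = (s, nz) over zip(c,d); the counts are recovered by floor division at the end
def compareTripletsfor_alt (c : List Int) (d : List Int) : List Int :=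
  let st := (c.zip d).foldl (fun (st : Int × Int) p =>
      if p.1 ≠ p.2 then (st.1 + (if p.1 > p.2 then 1 else -1), st.2 + 1) else st) (0, 0)
  [PySem.Int.floordiv (st.2 + st.1) 2, PySem.Int.floordiv (st.2 - st.1) 2]

-- ===== PRECONDITION & SPEC =====
-- Pre_ excludes exactly the inputs where A raises IndexError (d shorter than c).
def Pre_compareTripletsfor (c : List Int) (d : List Int) : Prop := c.length ≤ d.length
instance (c : List Int) (d : List Int) : Decidable (Pre_compareTripletsfor c d) := by unfold Pre_compareTripletsfor; infer_instance
def pvWitness_compareTripletsfor : List Int × List Int := ([1, 2, 3], [3, 2, 1])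

def Spec_compareTripletsfor (c : List Int) (d : List Int) (out : List Int) : Prop := out = compareTripletsfor_alt c d
instance (c : List Int) (d : List Int) (out : List Int) : Decidable (Spec_compareTripletsfor c d out) := by unfold Spec_compareTripletsfor; infer_instance

-- ===== CLAIM (what is proved, stated in full; the proofs are below) =====
def Claim_equal_compareTripletsfor : Prop := ∀ (c : List Int) (d : List Int), Dom_compareTripletsfor c d → Pre_compareTripletsfor c d → Spec_compareTripletsfor c d (compareTripletsfor c d)

-- ===== LEMMAS AND PROOFS =====

-- A's fold starting at index i computes the two counts over c zipped with d from index i on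
theorem pvA_loop (c d : List Int) (i : Nat) (h0 h1 : Int)
    (h : i + c.length ≤ d.length) :
    c.foldl (fun (st : (Int × Int) × Int) k =>
      let di := PySem.List.pyGetD d st.2 0
      let hasil := if k > di then (st.1.1 + 1, st.1.2)
                   else if k < di then (st.1.1, st.1.2 + 1)
                   else st.1
      (hasil, st.2 + 1)) ((h0, h1), (i : Int))
    = ((h0 + ((c.zip (d.drop i)).countP (fun p => decide (p.1 > p.2)) : Int),
        h1 + ((c.zip (d.drop i)).countP (fun p => decide (p.1 < p.2)) : Int)),
       (i : Int) + c.length) := by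
  induction c generalizing i h0 h1 with
  | nil => simp
  | cons k c ih =>
    have hd : i < d.length := by simp at h; omega
    have hdrop : d.drop i = d[i] :: d.drop (i + 1) := List.drop_eq_getElem_cons hd
    simp only [List.foldl_cons]
    have hget : PySem.List.pyGetD d (i : Int) 0 = d[i] := by
      simp [PySem.List.pyGetD_natCast, hd]
    rw [show ((i : Int) + 1) = ((i + 1 : Nat) : Int) by push_cast; ring]
    rw [hget]
    by_cases hgt : k > d[i]
    · simp only [hgt, if_pos]
      rw [ih (i + 1) _ _ (by simp at h ⊢; omega)]
      rw [hdrop, List.zip_cons_cons, List.countP_cons, List.countP_cons]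
      simp [Prod.ext_iff, hgt, not_lt.mpr (le_of_lt hgt)]
      omega
    · by_cases hlt : k < d[i]
      · simp only [if_neg hgt, if_pos hlt]
        rw [ih (i + 1) _ _ (by simp at h ⊢; omega)]
        rw [hdrop, List.zip_cons_cons, List.countP_cons, List.countP_cons]
        simp [Prod.ext_iff, hlt, not_lt.mpr (le_of_lt hlt)]
        omega
      · simp only [if_neg hgt, if_neg hlt]
        rw [ih (i + 1) _ _ (by simp at h ⊢; omega)]
        rw [hdrop, List.zip_cons_cons, List.countP_cons, List.countP_cons]
        simp [Prod.ext_iff, hgt, hlt]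
        omega

-- B's sign-sum fold over any pair list: s accumulates wins - losses, nz wins + losses
theorem pvB_loop (L : List (Int × Int)) (s0 nz0 : Int) :
    L.foldl (fun (st : Int × Int) p =>
      if p.1 ≠ p.2 then (st.1 + (if p.1 > p.2 then 1 else -1), st.2 + 1) else st) (s0, nz0)
    = (s0 + (L.countP (fun p => decide (p.1 > p.2)) : Int)
          - (L.countP (fun p => decide (p.1 < p.2)) : Int),
       nz0 + (L.countP (fun p => decide (p.1 > p.2)) : Int)
           + (L.countP (fun p => decide (p.1 < p.2)) : Int)) := by
  induction L generalizing s0 nz0 with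
  | nil => simp
  | cons p L ih =>
    simp only [List.foldl_cons, List.countP_cons]
    by_cases hne : p.1 ≠ p.2
    · rcases lt_or_gt_of_ne hne with hlt | hgt
      · simp only [if_pos hne, if_neg (not_lt.mpr (le_of_lt hlt)), ih]
        simp [hlt, not_lt.mpr (le_of_lt hlt)]
        constructor <;> push_cast <;> ring
      · simp only [if_pos hne, if_pos hgt, ih]
        simp [hgt, not_lt.mpr (le_of_lt hgt)]
        constructor <;> push_cast <;> ring
    · push_neg at hne
      rw [if_neg (by simp [hne]), ih]
      simp [hne]

-- ===== VERDICT (by name: the statement is the Claim_ definition above) =====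
theorem compareTripletsfor_spec : Claim_equal_compareTripletsfor := by
  intro c d _ hpre
  unfold Spec_compareTripletsfor compareTripletsfor compareTripletsfor_alt
  have hA := pvA_loop c d 0 0 0 (by simpa using hpre)
  simp only [Nat.cast_zero] at hA
  rw [hA, pvB_loop]
  simp only [List.drop_zero, zero_add]
  set g := ((c.zip d).countP (fun p => decide (p.1 > p.2)) : Int)
  set l := ((c.zip d).countP (fun p => decide (p.1 < p.2)) : Int)
  have h2g : PySem.Int.floordiv (g + l + (g - l)) 2 = g := by
    rw [show g + l + (g - l) = 2 * g by ring,
        PySem.Int.floordiv_eq_ediv_of_pos (by omega : (0:Int) < 2)]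
    exact Int.mul_ediv_cancel_left g (by norm_num)
  have h2l : PySem.Int.floordiv (g + l - (g - l)) 2 = l := by
    rw [show g + l - (g - l) = 2 * l by ring,
        PySem.Int.floordiv_eq_ediv_of_pos (by omega : (0:Int) < 2)]
    exact Int.mul_ediv_cancel_left l (by norm_num)
  rw [h2g, h2l]
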